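-- pv_equiv track=rewrite | github.com/gnetsanet/boltz-hackathon-template | hackathon/predict_hackathon.py | _diverse_subsample
-- ===== SOURCE A (Python) =====
-- def _diverse_subsample(lines: list[str], target: int) -> list[str]:
--     if not lines or len(lines) <= target:
--         return lines
--     is_fasta = any(l.startswith(">") for l in lines)
--     if is_fasta:
--         pairs, cur_h, cur_seq = [], None, []
--         for l in lines:
--             if l.startswith(">"):
--                 if cur_h is not None:
--                     pairs.append((cur_h, "".join(cur_seq)))
--                 cur_h, cur_seq = l, []
--             else:
--                 cur_seq.append(l.strip())
--         if cur_h is not None: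
--             pairs.append((cur_h, "".join(cur_seq)))
--         if len(pairs) <= target:
--             out = []
--             for h, s in pairs:
--                 out.extend([h, s])
--             return out
--         stride = max(1, len(pairs) // target)
--         sampled = pairs[::stride][:target]
--         out = []
--         for h, s in sampled:
--             out.extend([h, s])
--         return out
--     else:
--         stride = max(1, len(lines) // target)
--         return lines[::stride][:target]
-- ===== SOURCE B (Python) =====
-- def _parse_fasta(body):
--     # body[0] is a header line; split body into (header, joined stripped seq) records
--     if not body:
--         return []
--     h, rest = body[0], body[1:]
--     k = 0
--     while k < len(rest) and not rest[k].startswith(">"):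
--         k += 1
--     return [(h, "".join(l.strip() for l in rest[:k]))] + _parse_fasta(rest[k:])
--
--
-- def _diverse_subsample(lines: list[str], target: int) -> list[str]:
--     if not lines or len(lines) <= target:
--         return lines
--     i = 0
--     while i < len(lines) and not lines[i].startswith(">"):
--         i += 1
--     body = lines[i:]
--     if not body:  # no FASTA header anywhere
--         stride = max(1, len(lines) // target)
--         return lines[::stride][:target]
--     pairs = _parse_fasta(body)
--     if len(pairs) > target:
--         stride = max(1, len(pairs) // target)
--         pairs = pairs[::stride][:target]
--     return [x for p in pairs for x in p]
-- ===== Notes on version B (the rewrite author's own statement) =====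
-- stated objective: alternative
-- what changed: The FASTA parse is rewritten from A's single accumulator sweep (pairs/cur_h/cur_seq state machine) into a structural record splitter: drop the pre-header prefix once, then recursively split at header lines (scan-to-next-header, slice, recurse), with the subsample applied as a post-pass on the record list.
import Mathlib
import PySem

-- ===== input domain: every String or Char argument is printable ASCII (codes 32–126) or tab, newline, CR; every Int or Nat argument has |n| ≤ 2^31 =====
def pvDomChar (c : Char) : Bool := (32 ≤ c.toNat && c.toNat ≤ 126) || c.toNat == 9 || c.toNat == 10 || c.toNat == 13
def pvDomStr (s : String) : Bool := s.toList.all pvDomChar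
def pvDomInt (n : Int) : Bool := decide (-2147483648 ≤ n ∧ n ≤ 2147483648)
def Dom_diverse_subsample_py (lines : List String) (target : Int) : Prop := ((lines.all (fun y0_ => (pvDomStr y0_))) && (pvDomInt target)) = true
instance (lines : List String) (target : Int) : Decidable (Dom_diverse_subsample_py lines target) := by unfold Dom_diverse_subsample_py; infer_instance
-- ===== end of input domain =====

-- B replaces A's accumulator state machine by a recursive header-splitting parse; same cost, different decomposition.
-- ===== PORT A =====
def pvIsHdr (l : String) : Bool := PySem.Str.startswith l ">"   -- l.startswith(">")

def pvStepA (st : List (String × String) × Option String × List String) (l : String) :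
    List (String × String) × Option String × List String :=
  if pvIsHdr l then
    match st.2.1 with
    | some h => (st.1 ++ [(h, PySem.Str.join "" st.2.2)], some l, [])
    | none => (st.1, some l, [])
  else (st.1, st.2.1, st.2.2 ++ [PySem.Str.strip l])

def diverse_subsample_py (lines : List String) (target : Int) : List String :=
  if lines = [] ∨ (lines.length : Int) ≤ target then lines
  else
    let is_fasta := lines.any (fun l => pvIsHdr l)
    if is_fasta then
      let st := lines.foldl pvStepA ([], none, [])
      let pairs := match st.2.1 with
        | some h => st.1 ++ [(h, PySem.Str.join "" st.2.2)]
        | none => st.1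
      if (pairs.length : Int) ≤ target then
        pairs.foldl (fun out p => out ++ [p.1, p.2]) []
      else
        let stride := max 1 (PySem.Int.floordiv pairs.length target)
        let sampled := PySem.List.slice ((PySem.List.slice? pairs none none stride).getD []) none (some target)
        sampled.foldl (fun out p => out ++ [p.1, p.2]) []
    else
      let stride := max 1 (PySem.Int.floordiv lines.length target)
      PySem.List.slice ((PySem.List.slice? lines none none stride).getD []) none (some target)

-- ===== PORT B =====
-- the while-loop scan to the next header in Source B is rest.takeWhile / rest.dropWhile
def pvParseFasta : List String → List (String × String)
  | [] => []
  | h :: rest =>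
    (h, PySem.Str.join "" ((rest.takeWhile (fun l => !(pvIsHdr l))).map PySem.Str.strip))
      :: pvParseFasta (rest.dropWhile (fun l => !(pvIsHdr l)))
termination_by ls => ls.length
decreasing_by
  simp only [List.length_cons]
  exact Nat.lt_succ_of_le (List.length_dropWhile_le _ _)

def diverse_subsample_py_alt (lines : List String) (target : Int) : List String :=
  if lines = [] ∨ (lines.length : Int) ≤ target then lines
  else
    let body := lines.dropWhile (fun l => !(pvIsHdr l))
    if body = [] then
      let stride := max 1 (PySem.Int.floordiv lines.length target)
      PySem.List.slice ((PySem.List.slice? lines none none stride).getD []) none (some target)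
    else
      let pairs := pvParseFasta body
      let pairs' :=
        if target < (pairs.length : Int) then
          let stride := max 1 (PySem.Int.floordiv pairs.length target)
          PySem.List.slice ((PySem.List.slice? pairs none none stride).getD []) none (some target)
        else pairs
      pairs'.flatMap (fun p => [p.1, p.2])

-- ===== PRECONDITION & SPEC =====
-- Pre_ excludes nonempty input with target = 0, where Python A raises ZeroDivisionError (stride = len // 0).
def Pre_diverse_subsample_py (lines : List String) (target : Int) : Prop :=
  lines = [] ∨ target ≠ 0
instance (lines : List String) (target : Int) : Decidable (Pre_diverse_subsample_py lines target) := by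
  unfold Pre_diverse_subsample_py; infer_instance
def pvWitness_diverse_subsample_py : List String × Int := ([">h", "ACGT"], 1)

def Spec_diverse_subsample_py (lines : List String) (target : Int) (out : List String) : Prop :=
  out = diverse_subsample_py_alt lines target
instance (lines : List String) (target : Int) (out : List String) : Decidable (Spec_diverse_subsample_py lines target out) := by
  unfold Spec_diverse_subsample_py; infer_instance

-- ===== CLAIM (what is proved, stated in full; the proofs are below) =====
def Claim_equal_diverse_subsample_py : Prop := ∀ (lines : List String) (target : Int), Dom_diverse_subsample_py lines target → Pre_diverse_subsample_py lines target → Spec_diverse_subsample_py lines target (diverse_subsample_py lines target)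

-- ===== LEMMAS AND PROOFS =====
def pvFinish (st : List (String × String) × Option String × List String) : List (String × String) :=
  match st.2.1 with
  | some h => st.1 ++ [(h, PySem.Str.join "" st.2.2)]
  | none => st.1

theorem pvFoldA_some (ls : List String) : ∀ (pairs : List (String × String)) (h : String) (seq : List String),
    pvFinish (ls.foldl pvStepA (pairs, some h, seq))
      = pairs ++ (h, PySem.Str.join "" (seq ++ (ls.takeWhile (fun l => !(pvIsHdr l))).map PySem.Str.strip))
          :: pvParseFasta (ls.dropWhile (fun l => !(pvIsHdr l))) := by
  induction ls with
  | nil => intro pairs h seq; simp [pvFinish, pvParseFasta]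
  | cons l ls ih =>
    intro pairs h seq
    by_cases hl : pvIsHdr l
    · simp [pvStepA, hl, ih, pvParseFasta]
    · simp only [Bool.not_eq_true] at hl
      simp [pvStepA, hl, ih]

theorem pvFoldA_none (ls : List String) : ∀ (seq : List String),
    pvFinish (ls.foldl pvStepA ([], none, seq))
      = pvParseFasta (ls.dropWhile (fun l => !(pvIsHdr l))) := by
  induction ls with
  | nil => intro seq; simp [pvFinish, pvParseFasta]
  | cons l ls ih =>
    intro seq
    by_cases hl : pvIsHdr l
    · simp only [List.foldl_cons, pvStepA, hl, if_pos, List.dropWhile_cons, Bool.not_true]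
      rw [pvFoldA_some]
      simp [pvParseFasta]
    · simp only [Bool.not_eq_true] at hl
      simp [pvStepA, hl, ih]

theorem pv_any_iff_dropWhile (lines : List String) :
    (lines.any (fun l => pvIsHdr l) = true)
      ↔ lines.dropWhile (fun l => !(pvIsHdr l)) ≠ [] := by
  induction lines with
  | nil => simp
  | cons l ls ih =>
    by_cases hl : pvIsHdr l
    · simp [hl]
    · simp only [Bool.not_eq_true] at hl
      simp [hl, ih]

-- ===== VERDICT (by name: the statement is the Claim_ definition above) =====
theorem diverse_subsample_py_spec : Claim_equal_diverse_subsample_py := by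
  intro lines target _dom _pre
  unfold Spec_diverse_subsample_py diverse_subsample_py diverse_subsample_py_alt
  by_cases hguard : lines = [] ∨ (lines.length : Int) ≤ target
  · simp only [hguard, if_pos]
  · simp only [hguard, if_neg, not_false_iff]
    by_cases hf : lines.any (fun l => pvIsHdr l) = true
    · have hbody : lines.dropWhile (fun l => !(pvIsHdr l)) ≠ [] :=
        (pv_any_iff_dropWhile lines).mp hf
      have hpairs : (match (lines.foldl pvStepA ([], none, [])).2.1 with
          | some h => (lines.foldl pvStepA ([], none, [])).1 ++ [(h, PySem.Str.join "" (lines.foldl pvStepA ([], none, [])).2.2)]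
          | none => (lines.foldl pvStepA ([], none, [])).1)
          = pvParseFasta (lines.dropWhile (fun l => !(pvIsHdr l))) := by
        have := pvFoldA_none lines []
        simpa [pvFinish] using this
      simp only [hf, if_pos, hbody, if_neg, not_false_iff, hpairs]
      set pairs := pvParseFasta (lines.dropWhile (fun l => !(pvIsHdr l))) with hp
      by_cases hl : (pairs.length : Int) ≤ target
      · have hlt : ¬ target < (pairs.length : Int) := by omega
        simp only [hl, if_pos, hlt, if_neg, not_false_iff,
          PySem.List.foldl_append_eq_flatMap, List.nil_append]
      · have hlt : target < (pairs.length : Int) := by omega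
        simp only [hl, if_neg, not_false_iff, hlt, if_pos,
          PySem.List.foldl_append_eq_flatMap, List.nil_append]
    · have hbody : lines.dropWhile (fun l => !(pvIsHdr l)) = [] := by
        by_contra hne
        exact hf ((pv_any_iff_dropWhile lines).mpr hne)
      simp only [hf, Bool.false_eq_true, if_neg, not_false_iff, hbody, if_pos]
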